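-- pv_equiv track=rewrite | github.com/denisdavidenko/Lab_KMD_4-2 | lab 4(2).py | direct_entry
-- ===== SOURCE A (Python) =====
-- def direct_entry(expression):
--     ops = ['*', '-', '+', '%', '/', '^']
--     res = ''
--     tmp = ''
--     for i in range(len(expression)-1, -1, -1):
--         res += expression[i]
--
--     res1 = ''
--     for i in range(len(res)):
--         if res[i] in ops:
--             res1 += (''.join(list(reversed(tmp))))
--             tmp = ''
--             res1+= res[i]
--         else:
--             tmp += res[i]
--     res1 += (''.join(list(reversed(tmp))))
--     return res1
-- ===== SOURCE B (Python) =====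
-- def direct_entry(expression):
--     # Tokenize once (operand runs and single-char operators), then join the
--     # reversed token list: each operand keeps its internal character order.
--     tokens = []
--     buf = ''
--     for c in expression:
--         if c in '*-+%/^':
--             tokens.append(buf)
--             tokens.append(c)
--             buf = ''
--         else:
--             buf += c
--     tokens.append(buf)
--     return ''.join(reversed(tokens))
-- ===== Notes on version B (the rewrite author's own statement) =====
-- stated objective: simpler
-- what changed: B makes one forward pass that tokenizes the expression into operand runs and operators and joins the reversed token list, instead of A's reverse-the-whole-string pass followed by a second pass that re-reverses every operand run.
import Mathlib
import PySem

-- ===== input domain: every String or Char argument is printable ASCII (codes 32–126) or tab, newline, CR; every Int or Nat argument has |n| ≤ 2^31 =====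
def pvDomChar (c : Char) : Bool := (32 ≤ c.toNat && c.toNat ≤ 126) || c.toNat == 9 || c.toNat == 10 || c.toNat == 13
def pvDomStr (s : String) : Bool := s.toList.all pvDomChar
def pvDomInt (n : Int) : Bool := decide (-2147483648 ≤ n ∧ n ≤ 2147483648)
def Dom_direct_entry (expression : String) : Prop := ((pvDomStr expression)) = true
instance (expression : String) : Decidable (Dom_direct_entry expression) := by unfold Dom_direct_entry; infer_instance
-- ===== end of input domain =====

-- B tokenizes the expression in one forward pass and joins the reversed token list,
-- instead of A's reverse-whole-string pass followed by a pass re-reversing each operand run.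

-- ===== PORT A =====
-- the 'in ops' membership test of A
def pvIsOp (c : Char) : Bool := c ∈ (['*', '-', '+', '%', '/', '^'] : List Char)

-- one step of A's second loop, state = (res1, tmp)
def pvStepA (st : List Char × List Char) (c : Char) : List Char × List Char :=
  if pvIsOp c then (st.1 ++ st.2.reverse ++ [c], []) else (st.1, st.2 ++ [c])

def direct_entry (expression : String) : String :=
  let exprL : List Char := expression.toList
  -- first loop: for i in range(len(expression)-1, -1, -1): res += expression[i]
  -- (the index i is always in range, so expression[i] is pyGetD with an unused default)
  let res : List Char :=
    (PySem.List.pyRange (PySem.Str.len expression - 1) (-1) (-1)).foldl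
      (fun acc i => acc ++ [PySem.List.pyGetD exprL i ' ']) []
  -- second loop: for i in range(len(res)): …
  let st :=
    (PySem.List.pyRange 0 (PySem.List.len res) 1).foldl
      (fun st i => pvStepA st (PySem.List.pyGetD res i ' ')) ([], [])
  String.mk (st.1 ++ st.2.reverse)

-- ===== PORT B =====
-- one step of B's loop, state = (tokens, buf)
def pvStepB (st : List (List Char) × List Char) (c : Char) : List (List Char) × List Char :=
  if pvIsOp c then (st.1 ++ [st.2, [c]], []) else (st.1, st.2 ++ [c])

def direct_entry_alt (expression : String) : String :=
  let st := expression.toList.foldl pvStepB ([], [])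
  let tokens := st.1 ++ [st.2]
  String.mk tokens.reverse.flatten

-- ===== PRECONDITION & SPEC =====
def Spec_direct_entry (expression : String) (out : String) : Prop := out = direct_entry_alt expression
instance (expression : String) (out : String) : Decidable (Spec_direct_entry expression out) := by unfold Spec_direct_entry; infer_instance

-- ===== CLAIM (what is proved, stated in full; the proofs are below) =====
def Claim_equal_direct_entry : Prop := ∀ (expression : String), Dom_direct_entry expression → Spec_direct_entry expression (direct_entry expression)

-- ===== LEMMAS AND PROOFS =====

-- structural tokenizer: first operand run and the remaining token list
def pvTok : List Char → List Char × List (List Char)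
  | [] => ([], [])
  | c :: cs =>
    let p := pvTok cs
    if pvIsOp c then ([], [c] :: p.1 :: p.2) else (c :: p.1, p.2)

-- A's second loop, folded from the right over the ORIGINAL string, lands on pvTok
lemma pvFoldrA (l : List Char) :
    List.foldr (fun c st => pvStepA st c) ((([], []) : List Char × List Char)) l
      = ((pvTok l).2.reverse.flatten, (pvTok l).1.reverse) := by
  induction l with
  | nil => simp [pvTok]
  | cons c cs ih =>
    simp only [List.foldr_cons, ih, pvTok]
    by_cases h : pvIsOp c = true
    · simp [pvStepA, h, List.flatten_append]
    · simp [pvStepA, h]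

-- B's loop accumulates exactly the tokens of pvTok
lemma pvFoldlB (l : List Char) : ∀ (tks : List (List Char)) (buf : List Char),
    (List.foldl pvStepB (tks, buf) l).1 ++ [(List.foldl pvStepB (tks, buf) l).2]
      = tks ++ ((buf ++ (pvTok l).1) :: (pvTok l).2) := by
  induction l with
  | nil => intro tks buf; simp [pvTok]
  | cons c cs ih =>
    intro tks buf
    simp only [List.foldl_cons, pvTok]
    by_cases h : pvIsOp c = true
    · simp only [pvStepB, h, if_pos, ih]
      simp
    · simp only [pvStepB, h, Bool.false_eq_true, if_neg, ih, not_false_iff]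
      simp

-- A's first loop really reverses the string
lemma pvFirstLoop (l : List Char) :
    (PySem.List.pyRange ((l.length : Int) - 1) (-1) (-1)).foldl
      (fun acc i => acc ++ [PySem.List.pyGetD l i ' ']) [] = l.reverse := by
  have h := PySem.List.pyRange_neg_one_eq_reverse ((l.length : Int) - 1) (-1)
  simp only [show ((-1 : Int) + 1) = 0 by ring, show ((l.length : Int) - 1 + 1) = (l.length : Int) by ring] at h
  rw [h, PySem.List.foldl_append_singleton_eq_map, List.map_reverse,
      PySem.List.map_pyGetD_pyRange_zero']
  simp

-- ===== VERDICT (by name: the statement is the Claim_ definition above) =====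
theorem direct_entry_spec : Claim_equal_direct_entry := by
  intro expression _
  unfold Spec_direct_entry direct_entry direct_entry_alt
  set l := expression.toList with hl
  simp only [PySem.Str.len_eq, hl]
  rw [pvFirstLoop l]
  rw [show (PySem.List.len l.reverse) = ((l.reverse).length : Int) from by
        simp [PySem.List.len]]
  rw [PySem.List.foldl_pyRange_zero_pyGetD' l.reverse ' ' pvStepA ([], [])]
  rw [List.foldl_reverse, pvFoldrA l, ← hl]
  have hb := pvFoldlB l [] []
  simp only [List.nil_append] at hb
  rw [hb]
  simp [List.flatten_append]
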